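-- pv_equiv track=rewrite | github.com/JacobHarrison/Advent-of-Code-2024 | Day14/Star2.py | count_robots_in_quadrants
-- ===== SOURCE A (Python) =====
-- def count_robots_in_quadrants(grid):
--     rows = len(grid)
--     cols = len(grid[0])
--
--     mid_row = rows // 2
--     mid_col = cols // 2
--
--     top_left = [row[:mid_col] for row in grid[:mid_row]]
--     top_right = [row[mid_col+1:] for row in grid[:mid_row]]
--     bottom_left = [row[:mid_col] for row in grid[mid_row+1:]]
--     bottom_right = [row[mid_col+1:] for row in grid[mid_row+1:]]
--
--     top_left_robots = sum(robots for row in top_left for robots in row if isinstance(robots, (int)))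
--     top_right_robots = sum(robots for row in top_right for robots in row if isinstance(robots, (int)))
--     bottom_left_robots = sum(robots for row in bottom_left for robots in row if isinstance(robots, (int)))
--     bottom_right_robots = sum(robots for row in bottom_right for robots in row if isinstance(robots, (int)))
--
--     return top_left_robots, top_right_robots, bottom_left_robots, bottom_right_robots
-- ===== SOURCE B (Python) =====
-- def count_robots_in_quadrants(grid):
--     mid_row = len(grid) // 2
--     mid_col = len(grid[0]) // 2
--     tl = tr = bl = br = 0
--     for i, row in enumerate(grid):
--         if i == mid_row:
--             continue
--         for j, v in enumerate(row):
--             if j == mid_col: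
--                 continue
--             if i < mid_row:
--                 if j < mid_col:
--                     tl += v
--                 else:
--                     tr += v
--             else:
--                 if j < mid_col:
--                     bl += v
--                 else:
--                     br += v
--     return tl, tr, bl, br
-- ===== Notes on version B (the rewrite author's own statement) =====
-- stated objective: simpler
-- what changed: Replaces the four intermediate slice-of-slices lists and four separate sum comprehensions by one nested enumerate pass keeping four accumulators, classifying each cell by strict comparison of its indices with mid_row/mid_col.
import Mathlib
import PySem

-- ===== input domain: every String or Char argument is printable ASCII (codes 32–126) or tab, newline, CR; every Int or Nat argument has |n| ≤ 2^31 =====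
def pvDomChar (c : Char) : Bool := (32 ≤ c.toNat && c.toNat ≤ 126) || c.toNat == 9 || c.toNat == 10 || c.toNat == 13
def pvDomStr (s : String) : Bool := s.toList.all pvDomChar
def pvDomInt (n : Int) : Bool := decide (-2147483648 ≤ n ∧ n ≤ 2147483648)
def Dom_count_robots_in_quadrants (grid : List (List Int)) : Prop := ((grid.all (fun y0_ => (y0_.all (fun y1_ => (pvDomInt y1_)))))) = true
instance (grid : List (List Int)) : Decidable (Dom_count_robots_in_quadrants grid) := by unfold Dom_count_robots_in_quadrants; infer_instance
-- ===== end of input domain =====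

-- B replaces A's four quadrant slice lists and four sum comprehensions by a single
-- nested enumerate pass with four accumulators (objective: simpler).


-- ===== PORT A =====
def count_robots_in_quadrants (grid : List (List Int)) : Int × Int × Int × Int :=
  let rows : Int := grid.length
  match PySem.List.pyGet? grid 0 with
  | none => (0, 0, 0, 0)  -- Python raises IndexError on grid[0]; excluded by Pre_
  | some g0 =>
    let cols : Int := g0.length
    let mid_row := PySem.Int.floordiv rows 2
    let mid_col := PySem.Int.floordiv cols 2
    let top_left := (PySem.List.slice grid none (some mid_row)).map
      (fun row => PySem.List.slice row none (some mid_col))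
    let top_right := (PySem.List.slice grid none (some mid_row)).map
      (fun row => PySem.List.slice row (some (mid_col + 1)) none)
    let bottom_left := (PySem.List.slice grid (some (mid_row + 1)) none).map
      (fun row => PySem.List.slice row none (some mid_col))
    let bottom_right := (PySem.List.slice grid (some (mid_row + 1)) none).map
      (fun row => PySem.List.slice row (some (mid_col + 1)) none)
    -- isinstance(robots, int) is always true on List Int, so the filtered sums are plain sums
    (top_left.flatten.sum, top_right.flatten.sum,
     bottom_left.flatten.sum, bottom_right.flatten.sum)

-- ===== PORT B =====
def count_robots_in_quadrants_alt (grid : List (List Int)) : Int × Int × Int × Int :=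
  match PySem.List.pyGet? grid 0 with
  | none => (0, 0, 0, 0)  -- Python raises IndexError on grid[0]; excluded by Pre_
  | some g0 =>
    let mid_row := PySem.Int.floordiv (grid.length : Int) 2
    let mid_col := PySem.Int.floordiv (g0.length : Int) 2
    (PySem.List.enumerate grid 0).foldl
      (fun acc p =>
        if p.1 = mid_row then acc
        else
          (PySem.List.enumerate p.2 0).foldl
            (fun q c =>
              if c.1 = mid_col then q
              else if p.1 < mid_row then
                if c.1 < mid_col then (q.1 + c.2, q.2.1, q.2.2.1, q.2.2.2)
                else (q.1, q.2.1 + c.2, q.2.2.1, q.2.2.2)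
              else
                if c.1 < mid_col then (q.1, q.2.1, q.2.2.1 + c.2, q.2.2.2)
                else (q.1, q.2.1, q.2.2.1, q.2.2.2 + c.2))
            acc)
      (0, 0, 0, 0)

-- ===== PRECONDITION & SPEC =====
-- Pre_ excludes only the empty grid, on which A (and B) raise IndexError at grid[0].
def Pre_count_robots_in_quadrants (grid : List (List Int)) : Prop := grid ≠ []
instance (grid : List (List Int)) : Decidable (Pre_count_robots_in_quadrants grid) := by
  unfold Pre_count_robots_in_quadrants; infer_instance

def pvWitness_count_robots_in_quadrants : List (List Int) := [[1, 2, 3], [4, 5, 6], [7, 8, 9]]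

def Spec_count_robots_in_quadrants (grid : List (List Int)) (out : Int × Int × Int × Int) : Prop := out = count_robots_in_quadrants_alt grid
instance (grid : List (List Int)) (out : Int × Int × Int × Int) : Decidable (Spec_count_robots_in_quadrants grid out) := by unfold Spec_count_robots_in_quadrants; infer_instance

-- ===== CLAIM (what is proved, stated in full; the proofs are below) =====
def Claim_equal_count_robots_in_quadrants : Prop := ∀ (grid : List (List Int)), Dom_count_robots_in_quadrants grid → Pre_count_robots_in_quadrants grid → Spec_count_robots_in_quadrants grid (count_robots_in_quadrants grid)

-- ===== LEMMAS AND PROOFS =====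

-- inner loop of B on a row strictly above the middle row (adds to components 1 and 2)
theorem pv_inner_top (mc : Int) (r : List Int) : ∀ (k : Nat) (q : Int × Int × Int × Int),
    (PySem.List.enumerate r (k : Int)).foldl
      (fun q c =>
        if c.1 = mc then q
        else if c.1 < mc then (q.1 + c.2, q.2.1, q.2.2.1, q.2.2.2)
        else (q.1, q.2.1 + c.2, q.2.2.1, q.2.2.2)) q
    = (q.1 + (r.take (mc - k).toNat).sum, q.2.1 + (r.drop (mc - k + 1).toNat).sum,
       q.2.2.1, q.2.2.2) := by
  induction r with
  | nil => intro k q; simp [PySem.List.enumerate_nil]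
  | cons x t ih =>
    intro k q
    rw [PySem.List.enumerate_cons]
    have hc : ((k : Int) + 1) = ((k + 1 : Nat) : Int) := by push_cast; ring
    rcases lt_trichotomy ((k : Int)) mc with h | h | h
    · have h1 : (mc - k).toNat = (mc - (k + 1 : Nat)).toNat + 1 := by omega
      have h2 : (mc - k + 1).toNat = (mc - (k + 1 : Nat) + 1).toNat + 1 := by omega
      simp only [List.foldl_cons, if_neg (by omega : ¬ ((k : Int)) = mc), if_pos h, hc, ih]
      simp [h1, h2, List.take_succ_cons, List.drop_succ_cons, add_assoc]
    · have h1 : (mc - k).toNat = 0 := by omega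
      have h2 : (mc - (k + 1 : Nat)).toNat = 0 := by omega
      have h3 : (mc - k + 1).toNat = 1 := by omega
      have h4 : (mc - (k + 1 : Nat) + 1).toNat = 0 := by omega
      have h2' : (mc - ((k : Int) + 1)).toNat = 0 := by omega
      have h4' : (mc - ((k : Int) + 1) + 1).toNat = 0 := by omega
      simp only [List.foldl_cons, if_pos h, hc, ih]
      simp [h1, h3, h2', h4']
    · have h1 : (mc - k).toNat = 0 := by omega
      have h2 : (mc - (k + 1 : Nat)).toNat = 0 := by omega
      have h3 : (mc - k + 1).toNat = 0 := by omega
      have h4 : (mc - (k + 1 : Nat) + 1).toNat = 0 := by omega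
      simp only [List.foldl_cons, if_neg (by omega : ¬ ((k : Int)) = mc),
        if_neg (by omega : ¬ ((k : Int)) < mc), hc, ih]
      have h2' : (mc - ((k : Int) + 1)).toNat = 0 := by omega
      have h4' : (mc - ((k : Int) + 1) + 1).toNat = 0 := by omega
      simp [h1, h3, h2', h4', add_assoc]

-- inner loop of B on a row strictly below the middle row (adds to components 3 and 4)
theorem pv_inner_bottom (mc : Int) (r : List Int) : ∀ (k : Nat) (q : Int × Int × Int × Int),
    (PySem.List.enumerate r (k : Int)).foldl
      (fun q c =>
        if c.1 = mc then q
        else if c.1 < mc then (q.1, q.2.1, q.2.2.1 + c.2, q.2.2.2)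
        else (q.1, q.2.1, q.2.2.1, q.2.2.2 + c.2)) q
    = (q.1, q.2.1, q.2.2.1 + (r.take (mc - k).toNat).sum,
       q.2.2.2 + (r.drop (mc - k + 1).toNat).sum) := by
  induction r with
  | nil => intro k q; simp [PySem.List.enumerate_nil]
  | cons x t ih =>
    intro k q
    rw [PySem.List.enumerate_cons]
    have hc : ((k : Int) + 1) = ((k + 1 : Nat) : Int) := by push_cast; ring
    rcases lt_trichotomy ((k : Int)) mc with h | h | h
    · have h1 : (mc - k).toNat = (mc - (k + 1 : Nat)).toNat + 1 := by omega
      have h2 : (mc - k + 1).toNat = (mc - (k + 1 : Nat) + 1).toNat + 1 := by omega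
      simp only [List.foldl_cons, if_neg (by omega : ¬ ((k : Int)) = mc), if_pos h, hc, ih]
      simp [h1, h2, List.take_succ_cons, List.drop_succ_cons, add_assoc]
    · have h1 : (mc - k).toNat = 0 := by omega
      have h2 : (mc - (k + 1 : Nat)).toNat = 0 := by omega
      have h3 : (mc - k + 1).toNat = 1 := by omega
      have h4 : (mc - (k + 1 : Nat) + 1).toNat = 0 := by omega
      have h2' : (mc - ((k : Int) + 1)).toNat = 0 := by omega
      have h4' : (mc - ((k : Int) + 1) + 1).toNat = 0 := by omega
      simp only [List.foldl_cons, if_pos h, hc, ih]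
      simp [h1, h3, h2', h4']
    · have h1 : (mc - k).toNat = 0 := by omega
      have h2 : (mc - (k + 1 : Nat)).toNat = 0 := by omega
      have h3 : (mc - k + 1).toNat = 0 := by omega
      have h4 : (mc - (k + 1 : Nat) + 1).toNat = 0 := by omega
      simp only [List.foldl_cons, if_neg (by omega : ¬ ((k : Int)) = mc),
        if_neg (by omega : ¬ ((k : Int)) < mc), hc, ih]
      have h2' : (mc - ((k : Int) + 1)).toNat = 0 := by omega
      have h4' : (mc - ((k : Int) + 1) + 1).toNat = 0 := by omega
      simp [h1, h3, h2', h4', add_assoc]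

-- outer loop of B: sums of the four quadrant slice sums
theorem pv_outer (mr mc : Int) (rows : List (List Int)) : ∀ (k : Nat) (q : Int × Int × Int × Int),
    (PySem.List.enumerate rows (k : Int)).foldl
      (fun acc p =>
        if p.1 = mr then acc
        else
          (PySem.List.enumerate p.2 0).foldl
            (fun q c =>
              if c.1 = mc then q
              else if p.1 < mr then
                if c.1 < mc then (q.1 + c.2, q.2.1, q.2.2.1, q.2.2.2)
                else (q.1, q.2.1 + c.2, q.2.2.1, q.2.2.2)
              else
                if c.1 < mc then (q.1, q.2.1, q.2.2.1 + c.2, q.2.2.2)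
                else (q.1, q.2.1, q.2.2.1, q.2.2.2 + c.2))
            acc) q
    = (q.1 + ((rows.take (mr - k).toNat).map (fun r => (r.take mc.toNat).sum)).sum,
       q.2.1 + ((rows.take (mr - k).toNat).map (fun r => (r.drop (mc + 1).toNat).sum)).sum,
       q.2.2.1 + ((rows.drop (mr - k + 1).toNat).map (fun r => (r.take mc.toNat).sum)).sum,
       q.2.2.2 + ((rows.drop (mr - k + 1).toNat).map (fun r => (r.drop (mc + 1).toNat).sum)).sum) := by
  induction rows with
  | nil => intro k q; simp [PySem.List.enumerate_nil]
  | cons r t ih =>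
    intro k q
    rw [PySem.List.enumerate_cons]
    have hc : ((k : Int) + 1) = ((k + 1 : Nat) : Int) := by push_cast; ring
    have hmc : mc - (0 : Nat) = mc := by push_cast; ring
    rcases lt_trichotomy ((k : Int)) mr with h | h | h
    · have h1 : (mr - k).toNat = (mr - (k + 1 : Nat)).toNat + 1 := by omega
      have h2 : (mr - k + 1).toNat = (mr - (k + 1 : Nat) + 1).toNat + 1 := by omega
      simp only [List.foldl_cons, if_neg (by omega : ¬ ((k : Int)) = mr), if_pos h, hc, ih]
      have hz : ((0 : Nat) : Int) = (0 : Int) := rfl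
      rw [← hz, pv_inner_top mc r 0 q]
      simp [h1, h2, List.take_succ_cons, List.drop_succ_cons, add_assoc]
    · have h1 : (mr - k).toNat = 0 := by omega
      have h2 : (mr - (k + 1 : Nat)).toNat = 0 := by omega
      have h3 : (mr - k + 1).toNat = 1 := by omega
      have h4 : (mr - (k + 1 : Nat) + 1).toNat = 0 := by omega
      have h2' : (mr - ((k : Int) + 1)).toNat = 0 := by omega
      have h4' : (mr - ((k : Int) + 1) + 1).toNat = 0 := by omega
      simp only [List.foldl_cons, if_pos h, hc, ih]
      simp [h1, h3, h2', h4']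
    · have h1 : (mr - k).toNat = 0 := by omega
      have h2 : (mr - (k + 1 : Nat)).toNat = 0 := by omega
      have h3 : (mr - k + 1).toNat = 0 := by omega
      have h4 : (mr - (k + 1 : Nat) + 1).toNat = 0 := by omega
      have hlt : ¬ ((k : Int)) < mr := by omega
      simp only [List.foldl_cons, if_neg (by omega : ¬ ((k : Int)) = mr), if_neg hlt, hc, ih]
      have hz : ((0 : Nat) : Int) = (0 : Int) := rfl
      rw [← hz, pv_inner_bottom mc r 0 q]
      have h2' : (mr - ((k : Int) + 1)).toNat = 0 := by omega
      have h4' : (mr - ((k : Int) + 1) + 1).toNat = 0 := by omega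
      simp [h1, h3, h2', h4', add_assoc]

-- ===== VERDICT (by name: the statement is the Claim_ definition above) =====
theorem count_robots_in_quadrants_spec : Claim_equal_count_robots_in_quadrants := by
  intro grid _ hpre
  unfold Spec_count_robots_in_quadrants
  obtain ⟨g0, rest, rfl⟩ : ∃ g0 rest, grid = g0 :: rest := by
    cases grid with
    | nil => exact absurd rfl hpre
    | cons a b => exact ⟨a, b, rfl⟩
  have hget : PySem.List.pyGet? (g0 :: rest) (0 : Int) = some g0 := by
    simp [PySem.List.pyGet?, PySem.List.pyIdx?]
  unfold count_robots_in_quadrants count_robots_in_quadrants_alt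
  rw [hget]
  have hmr : PySem.Int.floordiv ((g0 :: rest).length : Int) 2
      = (((g0 :: rest).length / 2 : Nat) : Int) := by
    exact_mod_cast PySem.Int.floordiv_natCast (g0 :: rest).length 2
  have hmc : PySem.Int.floordiv ((g0.length : Nat) : Int) 2
      = ((g0.length / 2 : Nat) : Int) := by
    exact_mod_cast PySem.Int.floordiv_natCast g0.length 2
  simp only [hmr, hmc]
  set mrN : Nat := (g0 :: rest).length / 2 with hmrN
  set mcN : Nat := g0.length / 2 with hmcN
  -- B side: the outer-loop characterisation at k = 0
  have houter := pv_outer ((mrN : Nat) : Int) ((mcN : Nat) : Int) (g0 :: rest) 0 (0, 0, 0, 0)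
  simp only [Nat.cast_zero, sub_zero, zero_add] at houter
  rw [houter]
  -- A side: turn the slices into take/drop
  have hsub : ((mrN : Int) - (0 : Nat)).toNat = mrN := by omega
  have hsub1 : ((mrN : Int) - (0 : Nat) + 1).toNat = mrN + 1 := by omega
  have htop : PySem.List.slice (g0 :: rest) none (some ((mrN : Nat) : Int))
      = (g0 :: rest).take mrN := by
    rw [PySem.List.slice_to _ (by positivity)]; simp
  have hbot : PySem.List.slice (g0 :: rest) (some (((mrN : Nat) : Int) + 1)) none
      = (g0 :: rest).drop (mrN + 1) := by
    rw [PySem.List.slice_from _ (by positivity)]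
    congr 1
  have hleft : ∀ r : List Int, PySem.List.slice r none (some ((mcN : Nat) : Int))
      = r.take mcN := by
    intro r; rw [PySem.List.slice_to _ (by positivity)]; simp
  have hright : ∀ r : List Int, PySem.List.slice r (some (((mcN : Nat) : Int) + 1)) none
      = r.drop (mcN + 1) := by
    intro r; rw [PySem.List.slice_from _ (by positivity)]
    congr 1
  simp only [htop, hbot, hleft, hright]
  have hmcT : ((mcN : Int)).toNat = mcN := by omega
  have hmcT1 : (((mcN : Int)) + 1).toNat = mcN + 1 := by omega
  simp [List.sum_flatten, List.map_map, Function.comp_def, hmcT, hmcT1]
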